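-- pv_equiv track=rewrite | github.com/Vailish/ZICO_Algorithm_Study | 오태훈/4주차(2022.08.22~28)/17682.py | solution
-- ===== SOURCE A (Python) =====
-- def solution(dartResult):
--     queue_dart = list(map(str, dartResult))
--     queue = []
--     while queue_dart:
--         v = queue_dart.pop(0)
--         if v.isdigit() and queue_dart:
--             v2 = queue_dart.pop(0)
--             if v2.isdigit():
--                 queue.append(v + v2)
--             else:
--                 queue.append(v)
--                 queue.append(v2)
--         else:
--             queue.append(v)
--     result_stack = []
--     while queue:
--         value = queue.pop(0)
--
--         if value.isdigit():
--             value = int(value)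
--             squared = queue.pop(0)
--             if squared == 'D':
--                 value = value**2
--             elif squared == 'T':
--                 value = value**3
--             result_stack.append(value)
--         elif value == '*':
--             pop2 = result_stack.pop()
--             if result_stack:
--                 pop1 = result_stack.pop()
--                 result_stack.append(pop1 * 2)
--             result_stack.append(pop2 * 2)
--
--         elif value == '#':
--             pop1 = result_stack.pop()
--             result_stack.append(pop1 * -1)
--
--     answer = sum(result_stack)
--
--     return answer
-- ===== SOURCE B (Python) =====
-- def solution(dartResult):
--     s = dartResult
--     stack = []
--     i, n = 0, len(s)
--     while i < n:
--         c = s[i]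
--         if c.isdigit():
--             if i + 1 < n and s[i + 1].isdigit():
--                 num = int(s[i:i + 2])
--                 i += 2
--             else:
--                 num = int(c)
--                 i += 1
--             bonus = s[i]  # IndexError if the number has no following char, like A
--             i += 1
--             if bonus == 'D':
--                 num = num ** 2
--             elif bonus == 'T':
--                 num = num ** 3
--             stack.append(num)
--         elif c == '*':
--             stack[-1] *= 2
--             if len(stack) >= 2:
--                 stack[-2] *= 2
--             i += 1
--         elif c == '#':
--             stack[-1] *= -1
--             i += 1
--         else:
--             i += 1
--     return sum(stack)
-- ===== Notes on version B (the rewrite author's own statement) =====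
-- stated objective: faster
-- what changed: A tokenises with two O(n^2) queue passes (list.pop(0) plus a second pairing pass); B is a single forward index scan over the string maintaining the score stack directly.
-- outside the precondition, e.g. on solution('1234S'): A returns 12, B returns 16; on solution('1234'): A returns 12, B raises IndexError
import Mathlib
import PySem

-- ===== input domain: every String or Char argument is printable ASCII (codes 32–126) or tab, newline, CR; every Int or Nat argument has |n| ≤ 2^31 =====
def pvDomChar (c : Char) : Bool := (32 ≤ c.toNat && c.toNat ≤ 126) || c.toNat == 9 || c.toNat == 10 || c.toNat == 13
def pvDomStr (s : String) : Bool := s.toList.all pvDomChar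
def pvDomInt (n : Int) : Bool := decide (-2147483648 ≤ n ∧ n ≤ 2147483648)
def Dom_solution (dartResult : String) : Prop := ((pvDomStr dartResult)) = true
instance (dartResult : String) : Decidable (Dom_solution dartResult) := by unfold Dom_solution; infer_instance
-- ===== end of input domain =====

-- B replaces A's two O(n^2) queue passes (list.pop(0)) by one forward index scan with a stack; proved equal on Pre_.

-- ===== PORT A =====
-- first while-loop: pair up adjacent digit characters into two-character number tokens
def pvA_phase1 : List Char → List (List Char)
  | [] => []
  | [v] => [[v]]
  | v :: v2 :: rest =>
    if PySem.Chars.strIsdigit [v] then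
      if PySem.Chars.strIsdigit [v2] then
        [v, v2] :: pvA_phase1 rest
      else
        [v] :: [v2] :: pvA_phase1 rest
    else
      [v] :: pvA_phase1 (v2 :: rest)

-- second while-loop over the token queue; result_stack is kept head-first (head = Python list's last element)
def pvA_phase2 : List (List Char) → List Int → List Int
  | [], stack => stack
  | value :: queue, stack =>
    if PySem.Chars.strIsdigit value then
      match queue with
      | [] => stack  -- Python raises IndexError here (queue.pop(0) on empty); excluded by Pre_
      | squared :: queue' =>
        let v0 := (PySem.Int.ofChars? value).getD 0
        let v := if squared = ['D'] then v0 ^ 2 else if squared = ['T'] then v0 ^ 3 else v0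
        pvA_phase2 queue' (v :: stack)
    else if value = ['*'] then
      match stack with
      | [] => stack  -- Python raises IndexError (result_stack.pop() on empty); excluded by Pre_
      | pop2 :: s =>
        match s with
        | [] => pvA_phase2 queue [pop2 * 2]
        | pop1 :: s' => pvA_phase2 queue (pop2 * 2 :: pop1 * 2 :: s')
    else if value = ['#'] then
      match stack with
      | [] => stack  -- Python raises IndexError; excluded by Pre_
      | pop1 :: s => pvA_phase2 queue (pop1 * -1 :: s)
    else
      pvA_phase2 queue stack

def solution (dartResult : String) : Int :=
  (pvA_phase2 (pvA_phase1 dartResult.toList) []).sum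

-- ===== PORT B =====
-- bonus application: if bonus == 'D': num**2 elif bonus == 'T': num**3
def pvB_apply (bonus : Char) (num : Int) : Int :=
  if bonus = 'D' then num ^ 2 else if bonus = 'T' then num ^ 3 else num

-- single forward scan (Source B's while-loop over the index i), stack head-first
def pvB_loop : List Char → List Int → List Int
  | [], stack => stack
  | c :: rest, stack =>
    if PySem.Chars.isdigit c then
      match rest with
      | [] => stack  -- Source B raises IndexError reading the bonus char; excluded by Pre_
      | d :: rest2 =>
        if PySem.Chars.isdigit d then
          match rest2 with
          | [] => stack  -- bonus char missing after two-digit number: IndexError; excluded by Pre_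
          | bonus :: rest3 =>
            pvB_loop rest3 (pvB_apply bonus ((PySem.Int.ofChars? [c, d]).getD 0) :: stack)
        else
          pvB_loop rest2 (pvB_apply d ((PySem.Int.ofChars? [c]).getD 0) :: stack)
    else if c = '*' then
      match stack with
      | [] => stack  -- stack[-1] on empty stack: IndexError; excluded by Pre_
      | t :: s =>
        match s with
        | [] => pvB_loop rest [t * 2]
        | p :: s' => pvB_loop rest (t * 2 :: p * 2 :: s')
    else if c = '#' then
      match stack with
      | [] => stack  -- IndexError; excluded by Pre_
      | t :: s => pvB_loop rest (t * -1 :: s)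
    else
      pvB_loop rest stack

def solution_alt (dartResult : String) : Int :=
  (pvB_loop dartResult.toList []).sum

-- ===== PRECONDITION & SPEC =====
-- digit test at position i of the character list (out-of-range reads a blank, which is no digit)
def pvDigAt (l : List Char) (i : Nat) : Bool := PySem.Chars.isdigit (l.getD i ' ')

-- Pre_ is exactly the set of inputs on which the Python A returns normally. It excludes
-- (a) the strings on which A raises IndexError — a number (one digit, or two adjacent digits)
-- with no following bonus-slot character, or a '*'/'#' evaluated before any number was scored —
-- and (b) strings containing four consecutive digits, where A's left-to-right digit pairing
-- consumes a two-digit chunk as the bonus marker, an artefact of A's tokenisation on which B's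
-- forward scan legitimately reads the digits differently (see cites).
def Pre_solution (dartResult : String) : Prop :=
  (∀ i, i < dartResult.toList.length →
      ¬(pvDigAt dartResult.toList i = true ∧ pvDigAt dartResult.toList (i+1) = true ∧
        pvDigAt dartResult.toList (i+2) = true ∧ pvDigAt dartResult.toList (i+3) = true)) ∧
  (∀ i, i < dartResult.toList.length →
      pvDigAt dartResult.toList i = true → pvDigAt dartResult.toList (i+1) = false →
      ¬(2 ≤ i ∧ pvDigAt dartResult.toList (i-1) = true ∧ pvDigAt dartResult.toList (i-2) = true) →
      i + 1 < dartResult.toList.length) ∧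
  (∀ j, j < dartResult.toList.length →
      (dartResult.toList.getD j ' ' = '*' ∨ dartResult.toList.getD j ' ' = '#') →
      ¬((1 ≤ j ∧ pvDigAt dartResult.toList (j-1) = true) ∧
        ¬(3 ≤ j ∧ pvDigAt dartResult.toList (j-1) = true ∧ pvDigAt dartResult.toList (j-2) = true ∧
          pvDigAt dartResult.toList (j-3) = true)) →
      ∃ i, i < j ∧ pvDigAt dartResult.toList i = true)


instance (dartResult : String) : Decidable (Pre_solution dartResult) := by
  unfold Pre_solution
  exact @instDecidableAnd _ _ (by infer_instance)
    (@instDecidableAnd _ _ (by infer_instance) (by infer_instance))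

def pvWitness_solution : String := "1D2S#10S*"

def Spec_solution (dartResult : String) (out : Int) : Prop := out = solution_alt dartResult
instance (dartResult : String) (out : Int) : Decidable (Spec_solution dartResult out) := by
  unfold Spec_solution; infer_instance

-- ===== CLAIM (what is proved, stated in full; the proofs are below) =====
def Claim_equal_solution : Prop := ∀ (dartResult : String), Dom_solution dartResult → Pre_solution dartResult → Spec_solution dartResult (solution dartResult)

-- ===== LEMMAS AND PROOFS =====

-- proof-side reformulation of Pre_'s first clause: no four consecutive digit characters
def pvNoRun4 : List Char → Bool
  | a :: b :: c :: d :: tl =>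
    (!(PySem.Chars.isdigit a && PySem.Chars.isdigit b && PySem.Chars.isdigit c && PySem.Chars.isdigit d))
      && pvNoRun4 (b :: c :: d :: tl)
  | _ => true

lemma pvNoRun4_of_forall : ∀ (l : List Char),
    (∀ i, i < l.length → ¬(pvDigAt l i = true ∧ pvDigAt l (i+1) = true ∧
      pvDigAt l (i+2) = true ∧ pvDigAt l (i+3) = true)) → pvNoRun4 l = true
  | [], _ => rfl
  | [_], _ => rfl
  | [_, _], _ => rfl
  | [_, _, _], _ => rfl
  | a :: b :: c :: d :: tl, h => by
    have h0 := h 0 (by simp)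
    simp only [pvDigAt, List.getD_cons_zero, List.getD_cons_succ] at h0
    have htl := pvNoRun4_of_forall (b :: c :: d :: tl) (by
      intro i hi
      have := h (i+1) (by simp at hi ⊢; omega)
      simpa only [pvDigAt, List.getD_cons_succ] using this)
    simp only [pvNoRun4, htl, Bool.and_true, Bool.not_eq_true']
    cases hA : PySem.Chars.isdigit a <;> cases hB : PySem.Chars.isdigit b <;>
      cases hC : PySem.Chars.isdigit c <;> cases hD : PySem.Chars.isdigit d <;> simp_all

lemma pvNoRun4_tail {c : Char} {cs : List Char} (h : pvNoRun4 (c :: cs) = true) :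
    pvNoRun4 cs = true := by
  match cs with
  | [] => rfl
  | [_] => rfl
  | [_, _] => rfl
  | a :: b :: d :: tl =>
    simp only [pvNoRun4, Bool.and_eq_true] at h
    exact h.2

lemma pvNoRun4_head {a b c d : Char} {tl : List Char}
    (h : pvNoRun4 (a :: b :: c :: d :: tl) = true)
    (ha : PySem.Chars.isdigit a = true) (hb : PySem.Chars.isdigit b = true)
    (hc : PySem.Chars.isdigit c = true) : PySem.Chars.isdigit d = false := by
  simp only [pvNoRun4, Bool.and_eq_true, Bool.not_eq_true', Bool.and_eq_false_iff] at h
  rcases h.1 with h' | h'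
  · rcases h' with h' | h' <;> simp_all
  · exact h'

lemma chars_isdigit_one (c : Char) :
    PySem.Chars.strIsdigit [c] = PySem.Chars.isdigit c := by
  simp [PySem.Chars.strIsdigit]

lemma chars_isdigit_two (c d : Char) :
    PySem.Chars.strIsdigit [c, d] = (PySem.Chars.isdigit c && PySem.Chars.isdigit d) := by
  simp [PySem.Chars.strIsdigit]

lemma one_eq_D (c : Char) : ([c] = ['D']) ↔ c = 'D' := by simp
lemma one_eq_T (c : Char) : ([c] = ['T']) ↔ c = 'T' := by simp
lemma one_eq_star (c : Char) : ([c] = ['*']) ↔ c = '*' := by simp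
lemma one_eq_hash (c : Char) : ([c] = ['#']) ↔ c = '#' := by simp

-- a nondigit head passes through phase1 unchanged
lemma pvA_phase1_nondigit {c : Char} (rest : List Char)
    (hc : PySem.Chars.isdigit c = false) :
    pvA_phase1 (c :: rest) = [c] :: pvA_phase1 rest := by
  cases rest with
  | nil => rfl
  | cons d tl => simp [pvA_phase1, chars_isdigit_one, hc]

-- the core invariant: on strings with no four-digit run the two loops build identical stacks
lemma ports_agree : ∀ (n : Nat) (cs : List Char), cs.length ≤ n → pvNoRun4 cs = true →
    ∀ st, pvA_phase2 (pvA_phase1 cs) st = pvB_loop cs st := by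
  intro n
  induction n with
  | zero =>
    intro cs hlen _ st
    have : cs = [] := List.eq_nil_of_length_eq_zero (Nat.le_zero.mp hlen)
    subst this; rfl
  | succ n ih =>
    intro cs hlen hnr st
    match cs with
    | [] => rfl
    | c :: rest =>
      by_cases hc : PySem.Chars.isdigit c = true
      · -- digit head
        match rest with
        | [] =>
          simp [pvA_phase1, pvA_phase2, pvB_loop, chars_isdigit_one, hc]
        | d :: rest2 =>
          by_cases hd : PySem.Chars.isdigit d = true
          · -- two-digit number
            match rest2 with
            | [] =>
              simp [pvA_phase1, pvA_phase2, pvB_loop, chars_isdigit_one, chars_isdigit_two, hc, hd]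
            | b :: rest3 =>
              by_cases hb : PySem.Chars.isdigit b = true
              · -- bonus slot holds a digit; no-run-4 forbids a fourth digit after it
                match rest3 with
                | [] =>
                  simp [pvA_phase1, pvA_phase2, pvB_loop, pvB_apply, chars_isdigit_one,
                    chars_isdigit_two, hc, hd]
                | e :: rest4 =>
                  have he : PySem.Chars.isdigit e = false := pvNoRun4_head hnr hc hd hb
                  have hnr3 : pvNoRun4 (e :: rest4) = true :=
                    pvNoRun4_tail (pvNoRun4_tail (pvNoRun4_tail hnr))
                  have hrec := ih (e :: rest4) (by simp at hlen ⊢; omega) hnr3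
                  simp only [pvA_phase1, chars_isdigit_one, hc, hd, hb, he, if_true, if_false,
                    Bool.false_eq_true]
                  simp only [pvA_phase2, chars_isdigit_two, hc, hd, Bool.and_self, if_true]
                  rw [show [e] :: pvA_phase1 rest4 = pvA_phase1 (e :: rest4) from
                    (pvA_phase1_nondigit rest4 he).symm]
                  rw [hrec]
                  simp only [pvB_loop, hc, hd, if_true, pvB_apply, one_eq_D, one_eq_T]
              · -- nondigit bonus slot
                have hb' : PySem.Chars.isdigit b = false := by simpa using hb
                have hnr3 : pvNoRun4 rest3 = true :=
                  pvNoRun4_tail (pvNoRun4_tail (pvNoRun4_tail hnr))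
                have hrec := ih rest3 (by simp at hlen ⊢; omega) hnr3
                rw [pvB_loop.eq_def]
                simp only [hc, hd, if_true]
                rw [show pvA_phase1 (c :: d :: b :: rest3)
                    = [c, d] :: pvA_phase1 (b :: rest3) by
                  simp [pvA_phase1, chars_isdigit_one, hc, hd]]
                rw [pvA_phase1_nondigit rest3 hb']
                rw [pvA_phase2.eq_def]
                simp only [chars_isdigit_two, hc, hd, Bool.and_self, if_true]
                rw [hrec]
                simp only [pvB_apply, one_eq_D, one_eq_T]
          · -- one-digit number, d is its bonus slot
            have hd' : PySem.Chars.isdigit d = false := by simpa using hd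
            have hnr2 : pvNoRun4 rest2 = true := pvNoRun4_tail (pvNoRun4_tail hnr)
            have hrec := ih rest2 (by simp at hlen ⊢; omega) hnr2
            rw [pvB_loop.eq_def]
            simp only [hc, hd', Bool.false_eq_true, if_true, if_false]
            rw [show pvA_phase1 (c :: d :: rest2)
                = [c] :: [d] :: pvA_phase1 rest2 by
              simp [pvA_phase1, chars_isdigit_one, hc, hd']]
            rw [pvA_phase2.eq_def]
            simp only [chars_isdigit_one, hc, if_true]
            rw [hrec]
            simp only [pvB_apply, one_eq_D, one_eq_T]
      · -- nondigit head: '*', '#', or an ignored character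
        have hc' : PySem.Chars.isdigit c = false := by simpa using hc
        have hnr1 : pvNoRun4 rest = true := pvNoRun4_tail hnr
        have hrec := ih rest (by simp at hlen ⊢; omega) hnr1
        rw [pvA_phase1_nondigit rest hc']
        rw [pvA_phase2.eq_def, pvB_loop.eq_def]
        simp only [chars_isdigit_one, hc', Bool.false_eq_true, if_false,
          one_eq_star, one_eq_hash]
        by_cases hstar : c = '*'
        · simp only [hstar, if_true]
          match st with
          | [] => rfl
          | [t] => exact hrec _
          | t :: p :: s' => exact hrec _
        · by_cases hhash : c = '#'
          · simp only [hhash, if_true]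
            match st with
            | [] => rfl
            | t :: s => exact hrec _
          · simp only [hstar, hhash, if_false]
            exact hrec st

-- ===== VERDICT (by name: the statement is the Claim_ definition above) =====
theorem solution_spec : Claim_equal_solution := by
  intro s _ hPre
  show solution s = solution_alt s
  unfold solution solution_alt
  rw [ports_agree s.toList.length s.toList le_rfl (pvNoRun4_of_forall s.toList hPre.1) []]
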